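-- pv_equiv track=rewrite | github.com/Ark-Repoleved/BDroid_X | app/src/main/python/local_bundle_indexer.py | _score_bundle_for_asset
-- ===== SOURCE A (Python) =====
-- def _score_bundle_for_asset(asset_name, catalog_keys):
--     """
--     Score how well a bundle's catalog asset keys match a scanned m_Name.
--
--     Returns an integer score (higher = better match, 0 = no match).
--     """
--     # Strip extension from m_Name for stem matching
--     stem = asset_name.rsplit('.', 1)[0] if '.' in asset_name else asset_name
--
--     best_score = 0
--     for key in catalog_keys:
--         # Exact filename match (highest priority)
--         key_filename = key.rsplit('/', 1)[-1]
--         if key_filename == asset_name: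
--             return 100  # Perfect match, return immediately
--
--         # Stem appears in the key's filename portion
--         if stem in key_filename:
--             best_score = max(best_score, 50 + len(stem))
--
--         # Stem appears anywhere in the full key path
--         elif stem in key:
--             best_score = max(best_score, 10 + len(stem))
--
--     return best_score
-- ===== SOURCE B (Python) =====
-- def _score_bundle_for_asset(asset_name, catalog_keys):
--     """Tiered re-implementation: the score is one of four values (100,
--     50+len(stem), 10+len(stem), 0) decided by the best tier any key reaches,
--     so we answer with three short-circuiting any() passes in priority order."""
--     keys = list(catalog_keys)
--     stem = asset_name.rsplit('.', 1)[0] if '.' in asset_name else asset_name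
--     filenames = [k.rsplit('/', 1)[-1] for k in keys]
--     if any(fn == asset_name for fn in filenames):
--         return 100
--     if any(stem in fn for fn in filenames):
--         return 50 + len(stem)
--     if any(stem in k for k in keys):
--         return 10 + len(stem)
--     return 0
-- ===== Notes on version B (the rewrite author's own statement) =====
-- stated objective: alternative
-- what changed: Replaces the single accumulating max-score loop (with per-key if/elif and an early return) by three separate short-circuiting any() passes over the key list in tier priority order (exact filename, stem-in-filename, stem-in-key), exploiting that the score can only be 100, 50+len(stem), 10+len(stem) or 0.
import Mathlib
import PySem

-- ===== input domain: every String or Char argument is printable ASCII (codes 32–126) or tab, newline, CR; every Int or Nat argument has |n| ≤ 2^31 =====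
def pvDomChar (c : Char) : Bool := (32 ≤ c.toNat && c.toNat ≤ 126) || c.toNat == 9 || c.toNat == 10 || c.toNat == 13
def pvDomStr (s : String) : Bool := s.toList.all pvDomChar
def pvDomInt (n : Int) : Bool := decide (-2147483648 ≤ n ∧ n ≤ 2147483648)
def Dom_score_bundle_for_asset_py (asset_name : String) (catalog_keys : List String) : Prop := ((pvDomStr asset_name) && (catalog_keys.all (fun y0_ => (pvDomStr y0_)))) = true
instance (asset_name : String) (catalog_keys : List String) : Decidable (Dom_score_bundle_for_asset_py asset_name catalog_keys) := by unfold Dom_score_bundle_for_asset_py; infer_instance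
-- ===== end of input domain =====

-- B replaces A's single accumulating max-score loop by three short-circuiting
-- any() passes in tier priority order (alternative decomposition, same cost).

-- ===== PORT A =====
-- hand port (exact): s.rsplit(c, 1)[-1] = the part after the LAST occurrence
-- of c (the whole string if c is absent)
def pvAfterLast (c : Char) (s : String) : String :=
  String.ofList ((s.toList.reverse.takeWhile (fun x => x ≠ c)).reverse)

-- hand port (exact): s.rsplit(c, 1)[0] when c occurs in s = the part before
-- the LAST occurrence of c
def pvBeforeLast (c : Char) (s : String) : String :=
  String.ofList (((s.toList.reverse.dropWhile (fun x => x ≠ c)).drop 1).reverse)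

-- stem = asset_name.rsplit('.', 1)[0] if '.' in asset_name else asset_name
def pvStem (asset_name : String) : String :=
  if PySem.Str.isIn "." asset_name then pvBeforeLast '.' asset_name else asset_name

-- A's for-loop over catalog_keys with accumulator best_score and early return 100
def pvScoreLoop (asset_name stem : String) (keys : List String) (best : Int) : Int :=
  match keys with
  | [] => best
  | key :: rest =>
    let key_filename := pvAfterLast '/' key
    if key_filename == asset_name then 100
    else if PySem.Str.isIn stem key_filename then
      pvScoreLoop asset_name stem rest (max best (50 + PySem.Str.len stem))
    else if PySem.Str.isIn stem key then
      pvScoreLoop asset_name stem rest (max best (10 + PySem.Str.len stem))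
    else pvScoreLoop asset_name stem rest best

def score_bundle_for_asset_py (asset_name : String) (catalog_keys : List String) : Int :=
  pvScoreLoop asset_name (pvStem asset_name) catalog_keys 0

-- ===== PORT B =====
def score_bundle_for_asset_py_alt (asset_name : String) (catalog_keys : List String) : Int :=
  let stem := pvStem asset_name
  let filenames := catalog_keys.map (fun k => pvAfterLast '/' k)
  if filenames.any (fun fn => fn == asset_name) then 100
  else if filenames.any (fun fn => PySem.Str.isIn stem fn) then 50 + PySem.Str.len stem
  else if catalog_keys.any (fun k => PySem.Str.isIn stem k) then 10 + PySem.Str.len stem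
  else 0

-- ===== PRECONDITION & SPEC =====
def Spec_score_bundle_for_asset_py (asset_name : String) (catalog_keys : List String) (out : Int) : Prop := out = score_bundle_for_asset_py_alt asset_name catalog_keys
instance (asset_name : String) (catalog_keys : List String) (out : Int) : Decidable (Spec_score_bundle_for_asset_py asset_name catalog_keys out) := by unfold Spec_score_bundle_for_asset_py; infer_instance

-- ===== CLAIM (what is proved, stated in full; the proofs are below) =====
def Claim_equal_score_bundle_for_asset_py : Prop := ∀ (asset_name : String) (catalog_keys : List String), Dom_score_bundle_for_asset_py asset_name catalog_keys → Spec_score_bundle_for_asset_py asset_name catalog_keys (score_bundle_for_asset_py asset_name catalog_keys)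

-- ===== LEMMAS AND PROOFS =====

-- the score contributed by the non-exact tiers (B's last three branches)
def pvTier (stem : String) (keys : List String) : Int :=
  if keys.any (fun k => PySem.Str.isIn stem (pvAfterLast '/' k)) then 50 + PySem.Str.len stem
  else if keys.any (fun k => PySem.Str.isIn stem k) then 10 + PySem.Str.len stem
  else 0

lemma pvLen_nonneg (s : String) : 0 ≤ PySem.Str.len s := by
  simp [PySem.Str.len]

lemma pvTier_bounds (stem : String) (keys : List String) :
    0 ≤ pvTier stem keys ∧ pvTier stem keys ≤ 50 + PySem.Str.len stem := by
  have h := pvLen_nonneg stem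
  unfold pvTier; split_ifs <;> omega

lemma pvScoreLoop_eq (asset_name stem : String) (keys : List String) :
    ∀ best : Int, 0 ≤ best →
      pvScoreLoop asset_name stem keys best =
        if keys.any (fun k => pvAfterLast '/' k == asset_name) then 100
        else max best (pvTier stem keys) := by
  induction keys with
  | nil =>
    intro best hb
    simp only [pvScoreLoop, List.any_nil, Bool.false_eq_true, if_false]
    unfold pvTier
    simp only [List.any_nil, Bool.false_eq_true, if_false]
    omega
  | cons key rest ih =>
    intro best hb
    have hlen := pvLen_nonneg stem
    have htr := pvTier_bounds stem rest
    by_cases hex : (pvAfterLast '/' key == asset_name) = true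
    · simp [pvScoreLoop, hex]
    · have hex' : (pvAfterLast '/' key == asset_name) = false := eq_false_of_ne_true hex
      simp only [pvScoreLoop, hex, if_false, Bool.false_eq_true]
      by_cases hfn : PySem.Str.isIn stem (pvAfterLast '/' key) = true
      · rw [if_pos hfn, ih _ (by omega), List.any_cons, hex', Bool.false_or]
        have htk : pvTier stem (key :: rest) = 50 + PySem.Str.len stem := by
          unfold pvTier; rw [List.any_cons, hfn, Bool.true_or, if_pos rfl]
        rw [htk]
        split_ifs <;> omega
      · have hfn' : PySem.Str.isIn stem (pvAfterLast '/' key) = false := eq_false_of_ne_true hfn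
        rw [if_neg hfn]
        by_cases hk : PySem.Str.isIn stem key = true
        · rw [if_pos hk, ih _ (by omega), List.any_cons, hex', Bool.false_or]
          have htk : pvTier stem (key :: rest) =
              if rest.any (fun k => PySem.Str.isIn stem (pvAfterLast '/' k)) then
                50 + PySem.Str.len stem
              else 10 + PySem.Str.len stem := by
            unfold pvTier
            rw [List.any_cons, hfn', Bool.false_or, List.any_cons, hk, Bool.true_or]
            simp
          rw [htk]
          by_cases h1 : rest.any (fun k => PySem.Str.isIn stem (pvAfterLast '/' k)) = true
          · rw [if_pos h1]
            have h50 : pvTier stem rest = 50 + PySem.Str.len stem := by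
              unfold pvTier; rw [if_pos h1]
            split_ifs <;> omega
          · rw [if_neg h1]
            have hle : pvTier stem rest ≤ 10 + PySem.Str.len stem := by
              unfold pvTier
              rw [if_neg h1]
              split_ifs <;> omega
            split_ifs <;> omega
        · have hk' : PySem.Str.isIn stem key = false := eq_false_of_ne_true hk
          rw [if_neg hk, ih _ hb, List.any_cons, hex', Bool.false_or]
          have htk : pvTier stem (key :: rest) = pvTier stem rest := by
            unfold pvTier
            rw [List.any_cons, hfn', Bool.false_or, List.any_cons, hk', Bool.false_or]
          rw [htk]

-- ===== VERDICT (by name: the statement is the Claim_ definition above) =====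
theorem score_bundle_for_asset_py_spec : Claim_equal_score_bundle_for_asset_py := by
  intro asset_name catalog_keys _
  unfold Spec_score_bundle_for_asset_py score_bundle_for_asset_py score_bundle_for_asset_py_alt
  rw [pvScoreLoop_eq _ _ _ 0 le_rfl]
  have hlen := pvLen_nonneg (pvStem asset_name)
  simp only [List.any_map, Function.comp_def]
  split_ifs with h1 h2 h3
  · rfl
  · have : pvTier (pvStem asset_name) catalog_keys = 50 + PySem.Str.len (pvStem asset_name) := by
      unfold pvTier; rw [if_pos h2]
    omega
  · have : pvTier (pvStem asset_name) catalog_keys = 10 + PySem.Str.len (pvStem asset_name) := by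
      unfold pvTier; rw [if_neg h2, if_pos h3]
    omega
  · have : pvTier (pvStem asset_name) catalog_keys = 0 := by
      unfold pvTier; rw [if_neg h2, if_neg h3]
    omega
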